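-- pv_equiv track=rewrite | github.com/diwalsh/Medical-Imaging-Segmentation-Application | flask/threed.py | is_valid_mesh
-- ===== SOURCE A (Python) =====
-- def is_valid_mesh(vertices, faces):
--     if len(vertices) == 0 or len(faces) == 0:
--         return False
--     for face in faces:
--         if len(face) != 3:
--             return False
--         for idx in face:
--             if idx < 0 or idx >= len(vertices):
--                 return False
--     return True
-- ===== SOURCE B (Python) =====
-- def is_valid_mesh(vertices, faces):
--     if len(vertices) == 0 or len(faces) == 0:
--         return False
--     if not all(len(face) == 3 for face in faces):
--         return False
--     all_idx = [i for face in faces for i in face]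
--     return min(all_idx) >= 0 and max(all_idx) < len(vertices)
-- ===== Notes on version B (the rewrite author's own statement) =====
-- stated objective: alternative
-- what changed: Replaces A's per-index bounds branching inside nested loops by a shape pass (all faces length 3), then a flatten of all indices and a single aggregate min/max comparison against [0, len(vertices)).
import Mathlib
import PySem

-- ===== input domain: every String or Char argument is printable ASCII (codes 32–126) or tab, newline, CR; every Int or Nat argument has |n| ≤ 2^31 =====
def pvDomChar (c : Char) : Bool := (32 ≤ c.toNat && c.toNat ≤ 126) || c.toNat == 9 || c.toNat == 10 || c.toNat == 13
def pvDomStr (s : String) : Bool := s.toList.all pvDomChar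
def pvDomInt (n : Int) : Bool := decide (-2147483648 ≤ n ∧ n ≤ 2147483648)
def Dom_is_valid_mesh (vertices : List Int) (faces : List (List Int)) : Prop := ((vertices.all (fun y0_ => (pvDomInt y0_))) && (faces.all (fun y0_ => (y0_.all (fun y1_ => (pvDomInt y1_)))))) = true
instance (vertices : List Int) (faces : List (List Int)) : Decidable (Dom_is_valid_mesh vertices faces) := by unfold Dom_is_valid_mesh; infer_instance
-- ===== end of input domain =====

-- B validates the mesh by a shape pass (all faces length 3) then one aggregate min/max bounds
-- comparison over the flattened indices, instead of A's per-index branching in nested loops.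


-- ===== PORT A =====
-- inner loop: for idx in face: if idx < 0 or idx >= len(vertices): return False
def pvAInner (n : Int) : List Int → Bool
  | [] => true
  | idx :: rest => if idx < 0 || n ≤ idx then false else pvAInner n rest

-- outer loop: for face in faces: len check, then inner loop
def pvAOuter (n : Int) : List (List Int) → Bool
  | [] => true
  | face :: rest =>
      if face.length ≠ 3 then false
      else if pvAInner n face = false then false
      else pvAOuter n rest

def is_valid_mesh (vertices : List Int) (faces : List (List Int)) : Bool :=
  if vertices.length == 0 || faces.length == 0 then false
  else pvAOuter (vertices.length : Int) faces

-- ===== PORT B =====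
def is_valid_mesh_alt (vertices : List Int) (faces : List (List Int)) : Bool :=
  if vertices.length == 0 || faces.length == 0 then false
  else if !(faces.all (fun face => face.length == 3)) then false
  else
    let all_idx := faces.flatMap (fun face => face)
    -- min(all_idx) / max(all_idx); none is unreachable here (every face has 3 indices)
    match PySem.List.min? all_idx (fun x => x), PySem.List.max? all_idx (fun x => x) with
    | some m, some M => decide (0 ≤ m) && decide (M < (vertices.length : Int))
    | _, _ => false

-- ===== PRECONDITION & SPEC =====
def Spec_is_valid_mesh (vertices : List Int) (faces : List (List Int)) (out : Bool) : Prop := out = is_valid_mesh_alt vertices faces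
instance (vertices : List Int) (faces : List (List Int)) (out : Bool) : Decidable (Spec_is_valid_mesh vertices faces out) := by unfold Spec_is_valid_mesh; infer_instance

-- ===== CLAIM (what is proved, stated in full; the proofs are below) =====
def Claim_equal_is_valid_mesh : Prop := ∀ (vertices : List Int) (faces : List (List Int)), Dom_is_valid_mesh vertices faces → Spec_is_valid_mesh vertices faces (is_valid_mesh vertices faces)

-- ===== LEMMAS AND PROOFS =====

-- A's inner loop is the pointwise bounds check.
theorem pvAInner_eq_all (n : Int) (l : List Int) :
    pvAInner n l = l.all (fun i => decide (0 ≤ i) && decide (i < n)) := by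
  induction l with
  | nil => rfl
  | cons x t ih =>
      simp only [pvAInner, List.all_cons, ih]
      by_cases h0 : x < 0 <;> by_cases h1 : n ≤ x <;>
        simp [h0, h1] <;> omega

-- A's outer loop is "all faces have length 3" and "all flattened indices in bounds".
theorem pvAOuter_eq (n : Int) (fs : List (List Int)) :
    pvAOuter n fs =
      (fs.all (fun face => face.length == 3) &&
        (fs.flatMap (fun face => face)).all (fun i => decide (0 ≤ i) && decide (i < n))) := by
  induction fs with
  | nil => rfl
  | cons f t ih =>
      simp only [pvAOuter, List.all_cons, List.flatMap_cons, List.all_append, ih,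
        pvAInner_eq_all]
      by_cases h3 : f.length = 3
      · simp only [h3, ne_eq, not_true_eq_false, if_false, beq_self_eq_true, Bool.true_and]
        by_cases hin : (f.all (fun i => decide (0 ≤ i) && decide (i < n))) = true
        · rw [hin]; simp
        · simp only [Bool.not_eq_true] at hin
          rw [hin]; simp
      · have hb : (f.length == 3) = false := by simp [h3]
        simp [h3, hb]

-- The aggregate min/max comparison equals the pointwise bounds check on a nonempty list.
theorem minmax_eq_all (n : Int) (l : List Int) (hl : l ≠ []) :
    (match PySem.List.min? l (fun x => x), PySem.List.max? l (fun x => x) with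
      | some m, some M => decide (0 ≤ m) && decide (M < n)
      | _, _ => false) =
      l.all (fun i => decide (0 ≤ i) && decide (i < n)) := by
  obtain ⟨m, hm⟩ : ∃ m, PySem.List.min? l (fun x => x) = some m := by
    cases h : PySem.List.min? l (fun x => x) with
    | none => exact absurd ((PySem.List.min?_eq_none_iff _ _).mp h) hl
    | some m => exact ⟨m, rfl⟩
  obtain ⟨M, hM⟩ : ∃ M, PySem.List.max? l (fun x => x) = some M := by
    cases h : PySem.List.max? l (fun x => x) with
    | none => exact absurd ((PySem.List.max?_eq_none_iff _ _).mp h) hl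
    | some M => exact ⟨M, rfl⟩
  rw [hm, hM]
  simp only [Bool.and_eq_true, decide_eq_true_eq, List.all_eq_true]
  by_cases h : 0 ≤ m ∧ M < n
  · simp only [h.1, h.2, decide_true, Bool.and_self, eq_comm (a := true), decide_eq_true_eq,
      List.all_eq_true]
    intro i hi
    have h1 := PySem.List.min?_isMin hm i hi
    have h2 := PySem.List.max?_isMax hM i hi
    simp only [Bool.and_eq_true, decide_eq_true_eq]
    exact ⟨le_trans h.1 h1, lt_of_le_of_lt h2 h.2⟩
  · have hmem := PySem.List.min?_mem hm
    have hMem := PySem.List.max?_mem hM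
    have : ¬ (l.all (fun i => decide (0 ≤ i) && decide (i < n)) = true) := by
      simp only [List.all_eq_true, Bool.and_eq_true, decide_eq_true_eq]
      intro hall
      exact h ⟨(hall m hmem).1, (hall M hMem).2⟩
    simp only [Bool.not_eq_true] at this
    rw [this]
    by_cases h0 : 0 ≤ m <;> by_cases h1 : M < n <;> simp [h0, h1] <;> tauto

-- All faces of length 3 and faces nonempty give a nonempty flattening.
theorem flat_ne_nil (fs : List (List Int)) (hne : fs ≠ [])
    (h3 : fs.all (fun face => face.length == 3) = true) :
    fs.flatMap (fun face => face) ≠ [] := by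
  cases fs with
  | nil => exact absurd rfl hne
  | cons f t =>
      simp only [List.all_cons, Bool.and_eq_true, beq_iff_eq] at h3
      simp only [List.flatMap_cons, ne_eq, List.append_eq_nil_iff, not_and]
      intro hf
      rw [hf] at h3
      simp at h3

-- ===== VERDICT (by name: the statement is the Claim_ definition above) =====
theorem is_valid_mesh_spec : Claim_equal_is_valid_mesh := by
  intro vertices faces _
  unfold Spec_is_valid_mesh is_valid_mesh is_valid_mesh_alt
  by_cases hg : (vertices.length == 0 || faces.length == 0) = true
  · simp [hg]
  · simp only [hg, if_false, Bool.if_false_right]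
    have hfne : faces ≠ [] := by
      simp only [Bool.or_eq_true, beq_iff_eq, not_or, List.length_eq_zero_iff] at hg
      exact fun h => hg.2 (by simp [h])
    rw [pvAOuter_eq]
    by_cases h3 : (faces.all (fun face => face.length == 3)) = true
    · simp only [h3, Bool.not_true, Bool.true_and, if_false, Bool.false_eq_true]
      rw [minmax_eq_all _ _ (flat_ne_nil faces hfne h3)]
    · simp only [Bool.not_eq_true] at h3
      simp [h3]
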